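-- pv_equiv track=rewrite | github.com/pypi-data/pypi-mirror-398 | packages/pdftl/pdftl-0.3.1-py3-none-any.whl/pdftl/commands/parsers/add_text_parser.py | _find_options_part
-- ===== SOURCE A (Python) =====
-- def _find_options_part(s):
--     # Find the options_part (if it exists) by searching from the right.
--     # As per the prompt, we assume if a balanced (...) block exists at
--     # the end, it is the options block.
--     options_part = ""
--     rest_of_spec = s
--     if not s.endswith(")"):
--         return options_part, rest_of_spec
--
--     nest_level = 0
--     split_pos = -1
--     for i in range(len(s) - 1, -1, -1):
--         char = s[i]
--         if char == ")":
--             nest_level += 1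
--         elif char == "(":
--             nest_level -= 1
--
--         if nest_level == 0 and char == "(":
--             # Found the start of the balanced block
--             split_pos = i
--             break
--
--     if split_pos != -1:
--         # We found a balanced block. Treat it as the options.
--         options_part = s[split_pos:].strip()
--         rest_of_spec = s[:split_pos].strip()
--
--     return options_part, rest_of_spec
-- ===== SOURCE B (Python) =====
-- def _find_options_part(s):
--     if not s.endswith(")"):
--         return "", s
--     # The options block starts at the
--     # i.e. the last index, holding an opening parenthesis, where the prefix balance
--     # equals the balance of the whole string; one left-to-right pass, no break.
--     total = 0
--     for ch in s:
--         if ch == ")":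
--             total += 1
--         elif ch == "(":
--             total -= 1
--     split_pos = -1
--     bal = 0
--     for i, ch in enumerate(s):
--         if ch == "(":
--             if bal == total:
--                 split_pos = i
--             bal -= 1
--         elif ch == ")":
--             bal += 1
--     if split_pos == -1:
--         return "", s
--     return s[split_pos:].strip(), s[:split_pos].strip()
-- ===== Notes on version B (the rewrite author's own statement) =====
-- stated objective: alternative
-- what changed: Replaced A's right-to-left counter scan with an early break by two left-to-right passes with no break: a total-balance pass plus a prefix-balance pass that records the last opening parenthesis whose prefix balance equals the total (equivalently, whose suffix is balanced).
import Mathlib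
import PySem

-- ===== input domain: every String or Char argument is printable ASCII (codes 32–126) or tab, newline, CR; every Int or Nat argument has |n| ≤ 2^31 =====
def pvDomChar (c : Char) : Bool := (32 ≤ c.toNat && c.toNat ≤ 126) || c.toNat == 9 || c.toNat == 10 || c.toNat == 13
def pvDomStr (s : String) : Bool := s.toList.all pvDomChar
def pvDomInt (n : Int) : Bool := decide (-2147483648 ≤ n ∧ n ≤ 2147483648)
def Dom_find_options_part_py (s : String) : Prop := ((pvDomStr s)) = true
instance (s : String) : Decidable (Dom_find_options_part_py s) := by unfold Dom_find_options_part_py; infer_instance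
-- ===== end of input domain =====

-- B replaces A's right-to-left counter scan with an early break by two left-to-right
-- passes (total balance, then a prefix-balance pass recording the last matching open paren):
-- an alternative decomposition of the same O(n) task; return values proved equal everywhere.


-- ===== PORT A =====
-- A's loop 'for i in range(len(s)-1,-1,-1)' reads s[i] right-to-left; ported as
-- structural recursion over the reversed char list carrying the current index i,
-- with the break returned as the split position (-1 = no break; exact).
def aLoop : List Char → Int → Int → Int
  | [], _, _ => -1
  | c :: rest, i, nest =>
      let nest' := if c = ')' then nest + 1 else if c = '(' then nest - 1 else nest
      if nest' = 0 ∧ c = '(' then i else aLoop rest (i - 1) nest'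

def find_options_part_py (s : String) : String × String :=
  if PySem.Str.endswith s ")" = false then ("", s)
  else
    let split_pos := aLoop s.toList.reverse ((PySem.Str.len s : Int) - 1) 0
    if split_pos ≠ -1 then
      (PySem.Str.strip (PySem.Str.slice s (some split_pos) none),
       PySem.Str.strip (PySem.Str.slice s none (some split_pos)))
    else ("", s)

-- ===== PORT B =====
-- first pass: total balance of the whole string (')' = +1, '(' = -1)
def totalLoop : List Char → Int → Int
  | [], total => total
  | c :: rest, total =>
      totalLoop rest (if c = ')' then total + 1 else if c = '(' then total - 1 else total)

-- second pass: prefix balance, recording the last open paren whose prefix balance = total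
def bLoop : List (Int × Char) → Int → Int → Int → Int
  | [], _, split_pos, _ => split_pos
  | (i, c) :: rest, total, split_pos, bal =>
      if c = '(' then
        bLoop rest total (if bal = total then i else split_pos) (bal - 1)
      else if c = ')' then bLoop rest total split_pos (bal + 1)
      else bLoop rest total split_pos bal

def find_options_part_py_alt (s : String) : String × String :=
  if PySem.Str.endswith s ")" = false then ("", s)
  else
    let total := totalLoop s.toList 0
    let split_pos := bLoop (PySem.List.enumerate s.toList 0) total (-1) 0
    if split_pos = -1 then ("", s)
    else
      (PySem.Str.strip (PySem.Str.slice s (some split_pos) none),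
       PySem.Str.strip (PySem.Str.slice s none (some split_pos)))

-- ===== PRECONDITION & SPEC =====
def Spec_find_options_part_py (s : String) (out : String × String) : Prop := out = find_options_part_py_alt s
instance (s : String) (out : String × String) : Decidable (Spec_find_options_part_py s out) := by unfold Spec_find_options_part_py; infer_instance

-- ===== CLAIM (what is proved, stated in full; the proofs are below) =====
def Claim_equal_find_options_part_py : Prop := ∀ (s : String), Dom_find_options_part_py s → Spec_find_options_part_py s (find_options_part_py s)

-- ===== LEMMAS AND PROOFS =====

-- balance of a char list: #')' − #'('
def balC (l : List Char) : Int := (l.count ')' : Int) - (l.count '(' : Int)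

theorem balC_nil : balC [] = 0 := by simp [balC]

theorem balC_cons (c : Char) (l : List Char) :
    balC (c :: l) = (if c = ')' then 1 else if c = '(' then -1 else 0) + balC l := by
  simp only [balC, List.count_cons]
  by_cases h1 : c = ')' <;> by_cases h2 : c = '(' <;>
    simp_all [beq_iff_eq] <;> ring

theorem totalLoop_eq (l : List Char) : ∀ a : Int, totalLoop l a = a + balC l := by
  induction l with
  | nil => intro a; simp [totalLoop, balC_nil]
  | cons c rest ih =>
      intro a
      simp only [totalLoop, ih, balC_cons]
      split_ifs <;> ring

-- shared characterization: last index i < m holding an open paren with balanced suffix, else -1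
def specFold (t : List Char) (m : Nat) : Int :=
  (List.range m).foldl
    (fun acc i => if t[i]? = some '(' ∧ balC (t.drop i) = 0 then (i : Int) else acc) (-1)

theorem aLoop_eq (t : List Char) : ∀ m : Nat, m ≤ t.length →
    aLoop (t.take m).reverse ((m : Int) - 1) (balC (t.drop m)) = specFold t m := by
  intro m
  induction m with
  | zero => intro _; simp [aLoop, specFold]
  | succ m ih =>
      intro hm
      have hlt : m < t.length := by omega
      have htake : t.take (m + 1) = t.take m ++ [t[m]] := by
        rw [List.take_add_one]; simp [List.getElem?_eq_getElem hlt]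
      have hdrop : t.drop m = t[m] :: t.drop (m + 1) :=
        List.drop_eq_getElem_cons hlt
      have hnest : balC (t.drop m) =
          (if t[m] = ')' then 1 else if t[m] = '(' then -1 else 0) + balC (t.drop (m + 1)) := by
        rw [hdrop, balC_cons]
      have hrev : (t.take (m + 1)).reverse = t[m] :: (t.take m).reverse := by
        rw [htake]; simp
      rw [hrev]
      show (let nest' := if t[m] = ')' then balC (t.drop (m+1)) + 1
                         else if t[m] = '(' then balC (t.drop (m+1)) - 1 else balC (t.drop (m+1));
            if nest' = 0 ∧ t[m] = '(' then ((m:Int) + 1 - 1)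
            else aLoop (t.take m).reverse ((m:Int) + 1 - 1 - 1) nest') = specFold t (m + 1)
      have hn' : (if t[m] = ')' then balC (t.drop (m+1)) + 1
                  else if t[m] = '(' then balC (t.drop (m+1)) - 1 else balC (t.drop (m+1)))
                 = balC (t.drop m) := by
        rw [hnest]; split_ifs <;> ring
      simp only [hn']
      have hspec : specFold t (m + 1) =
          (if t[m]? = some '(' ∧ balC (t.drop m) = 0 then (m : Int) else specFold t m) := by
        simp [specFold, List.range_succ, List.foldl_append]
      by_cases hc : balC (t.drop m) = 0 ∧ t[m] = '('
      · rw [if_pos hc, hspec, if_pos ⟨by simp [List.getElem?_eq_getElem hlt, hc.2], hc.1⟩]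
        ring
      · rw [if_neg hc, hspec, if_neg (by
          rintro ⟨h1, h2⟩
          exact hc ⟨h2, by simpa [List.getElem?_eq_getElem hlt] using h1⟩)]
        have : (m : Int) + 1 - 1 - 1 = (m : Int) - 1 := by ring
        rw [this]
        exact ih (by omega)

theorem bLoop_eq (u : List Char) : ∀ (k : Int) (split bal : Int),
    bLoop (PySem.List.enumerate u k) (bal + balC u) split bal
      = (List.range u.length).foldl
          (fun acc j => if u[j]? = some '(' ∧ balC (u.drop j) = 0 then k + (j : Int) else acc)
          split := by
  induction u with
  | nil => intro k split bal; simp [PySem.List.enumerate_nil, bLoop]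
  | cons c rest ih =>
      intro k split bal
      rw [PySem.List.enumerate_cons]
      have hrange : List.range (rest.length + 1) = 0 :: (List.range rest.length).map Nat.succ :=
        List.range_succ_eq_map
      have hstep : ∀ (acc : Int),
          (List.range rest.length).foldl
              (fun x (y : Nat) => if (c :: rest)[y.succ]? = some '(' ∧
                  balC (List.drop y.succ (c :: rest)) = 0 then k + (y.succ : Int) else x) acc
            = (List.range rest.length).foldl
              (fun x (j : Nat) => if rest[j]? = some '(' ∧ balC (rest.drop j) = 0
                  then (k + 1) + (j : Int) else x) acc := by
        intro acc
        have hfun : (fun (x : Int) (y : Nat) => if (c :: rest)[y.succ]? = some '(' ∧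
              balC (List.drop y.succ (c :: rest)) = 0 then k + (y.succ : Int) else x)
            = (fun x (j : Nat) => if rest[j]? = some '(' ∧ balC (rest.drop j) = 0
                  then (k + 1) + (j : Int) else x) := by
          funext x y
          simp only [Nat.succ_eq_add_one, List.getElem?_cons_succ, List.drop_succ_cons]
          have : k + ((y : Int) + 1) = (k + 1) + (y : Int) := by ring
          push_cast
          rw [this]
        rw [hfun]
      by_cases h1 : c = '('
      · subst h1
        have hne : ¬ (('(' : Char) = ')') := by decide
        have hbal : balC ('(' :: rest) = -1 + balC rest := by
          rw [balC_cons, if_neg hne, if_pos rfl]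
        have hb : bal + balC ('(' :: rest) = (bal - 1) + balC rest := by rw [hbal]; ring
        have l1 : bLoop (((k, '(') : Int × Char) :: PySem.List.enumerate rest (k + 1))
              (bal + balC ('(' :: rest)) split bal
            = bLoop (PySem.List.enumerate rest (k + 1)) ((bal - 1) + balC rest)
              (if bal = bal + balC ('(' :: rest) then k else split) (bal - 1) := by
          rw [← hb]; simp [bLoop]
        rw [l1, ih (k + 1) _ (bal - 1)]
        rw [List.length_cons, hrange, List.foldl_cons, List.foldl_map, hstep]
        congr 1
        simp only [List.getElem?_cons_zero, List.drop_zero, Nat.cast_zero, add_zero,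
          Option.some.injEq, true_and, hbal]
        split_ifs <;> first | rfl | omega
      · have l1 : bLoop (((k, c) : Int × Char) :: PySem.List.enumerate rest (k + 1))
              (bal + balC (c :: rest)) split bal
            = bLoop (PySem.List.enumerate rest (k + 1)) (bal + balC (c :: rest))
              split (if c = ')' then bal + 1 else bal) := by
          by_cases h2 : c = ')' <;> simp [bLoop, h1, h2]
        have hbal : balC (c :: rest) = (if c = ')' then 1 else 0) + balC rest := by
          rw [balC_cons]; split_ifs with hp <;> simp_all
        have hb : bal + balC (c :: rest) = (if c = ')' then bal + 1 else bal) + balC rest := by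
          rw [hbal]; split_ifs <;> ring
        rw [l1, hb, ih (k + 1) _ _]
        rw [List.length_cons, hrange, List.foldl_cons, List.foldl_map, hstep]
        congr 1
        rw [if_neg]
        simp [h1]

theorem split_agree (t : List Char) :
    aLoop t.reverse ((t.length : Int) - 1) 0
      = bLoop (PySem.List.enumerate t 0) (totalLoop t 0) (-1) 0 := by
  have hA := aLoop_eq t t.length le_rfl
  simp only [List.take_length, List.drop_length, balC_nil] at hA
  have hfun : (fun (acc : Int) (i : Nat) => if t[i]? = some '(' ∧ balC (t.drop i) = 0 then (i : Int) else acc)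
      = (fun (acc : Int) (j : Nat) => if t[j]? = some '(' ∧ balC (t.drop j) = 0 then (0 : Int) + (j : Int) else acc) := by
    funext acc i
    rw [zero_add]
  rw [totalLoop_eq, bLoop_eq t 0 (-1) 0, hA, specFold, hfun]

theorem find_options_part_py_spec : Claim_equal_find_options_part_py := by
  intro s _
  unfold Spec_find_options_part_py find_options_part_py find_options_part_py_alt
  dsimp only
  by_cases h : PySem.Str.endswith s ")" = false
  · rw [if_pos h, if_pos h]
  · rw [if_neg h, if_neg h]
    have hlen : (PySem.Str.len s : Int) = (s.toList.length : Int) := by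
      simp [PySem.Str.len_eq]
    rw [hlen, split_agree s.toList]
    generalize bLoop (PySem.List.enumerate s.toList 0) (totalLoop s.toList 0) (-1) 0 = sp
    by_cases h2 : sp = -1
    · simp [h2]
    · simp [h2]
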